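-- pv_equiv track=rewrite | github.com/chiralcentre/Kattis | doorman.py | doorman
-- ===== SOURCE A (Python) =====
-- def check_exceed(M,person,limit):
--     M += 1 if person == 'M' else -1
--     return True if abs(M) > limit else False
--
-- def doorman(string,L):
--     M,people = 0,0
--     while string:
--         if not check_exceed(M,string[0],L):
--             M += 1 if string[0] == 'M' else -1
--             people += 1
--             string.pop(0)
--         else:
--             if len(string) > 1 and not check_exceed(M,string[1],L):
--                 M += 1 if string[1] == 'M' else -1
--                 people += 1
--                 string.pop(1)
--             else:
--                 return people
--     return people
-- ===== SOURCE B (Python) =====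
-- def doorman(string, L):
--     M = 0
--     people = 0
--     held = None          # a stuck front element, kept aside instead of A's pop(1)
--     i = 0
--     n = len(string)
--     while True:
--         if held is not None:
--             front = held
--         elif i < n:
--             front = string[i]
--         else:
--             return people
--         d = 1 if front == 'M' else -1
--         if abs(M + d) <= L:
--             M += d
--             people += 1
--             if held is not None:
--                 held = None
--             else:
--                 i += 1
--             continue
--         # front does not fit: try the next element of the stream
--         if held is None:
--             held = front
--             i += 1
--         if i >= n:
--             return people
--         d = 1 if string[i] == 'M' else -1
--         if abs(M + d) <= L:
--             M += d
--             people += 1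
--             i += 1
--         else:
--             return people
-- ===== Notes on version B (the rewrite author's own statement) =====
-- stated objective: faster
-- what changed: B replaces A's repeated list.pop(0)/pop(1) mutation with a single forward index pass plus a one-element 'held' register for the stuck front person, making the scan O(n); B does not mutate the input list (A empties it of admitted people).
import Mathlib
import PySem

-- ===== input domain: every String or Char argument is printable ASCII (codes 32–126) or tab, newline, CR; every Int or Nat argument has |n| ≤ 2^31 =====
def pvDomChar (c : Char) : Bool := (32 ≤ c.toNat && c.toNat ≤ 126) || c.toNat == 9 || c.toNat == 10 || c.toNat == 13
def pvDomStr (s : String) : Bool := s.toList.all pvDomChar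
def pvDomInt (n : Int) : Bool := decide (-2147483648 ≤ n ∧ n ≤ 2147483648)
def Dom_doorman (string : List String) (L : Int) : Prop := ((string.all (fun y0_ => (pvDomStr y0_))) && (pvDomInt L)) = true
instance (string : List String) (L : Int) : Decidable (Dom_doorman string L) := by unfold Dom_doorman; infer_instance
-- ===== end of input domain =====

-- B replaces A's repeated pop(0)/pop(1) list mutation by one forward pass with a 'held' register (O(n) vs O(n^2)).
-- Equivalence is about the RETURN value only: Python A empties the admitted prefix out of its argument list, B does not mutate it.

-- ===== PORT A =====
def check_exceed (M : Int) (person : String) (limit : Int) : Bool :=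
  let M' := M + (if person = "M" then (1 : Int) else -1)
  if |M'| > limit then true else false

-- A's while loop over the (mutated) list, state (M, people); pop(0) drops the head, pop(1) keeps the head.
def doormanGo (L : Int) : List String → Int → Int → Int
  | [], _, people => people
  | x :: rest, M, people =>
    if ¬ check_exceed M x L then
      doormanGo L rest (M + (if x = "M" then 1 else -1)) (people + 1)
    else
      match rest with
      | y :: rest' =>
        if ¬ check_exceed M y L then
          doormanGo L (x :: rest') (M + (if y = "M" then 1 else -1)) (people + 1)
        else people
      | [] => people
  termination_by s => s.length

def doorman (string : List String) (L : Int) : Int :=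
  doormanGo L string 0 0

-- ===== PORT B =====
def pvDelta (x : String) : Int := if x = "M" then 1 else -1

-- B's single pass: 'held' is the stuck front person, 'rest' the not-yet-scanned suffix (the index i in Source B).
def doormanAltGo (L : Int) (M people : Int) : Option String → List String → Int
  | some h, rest =>
    if |M + pvDelta h| ≤ L then
      doormanAltGo L (M + pvDelta h) (people + 1) none rest
    else
      match rest with
      | [] => people
      | y :: rs =>
        if |M + pvDelta y| ≤ L then doormanAltGo L (M + pvDelta y) (people + 1) (some h) rs
        else people
  | none, rest =>
    match rest with
    | [] => people
    | x :: rs =>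
      if |M + pvDelta x| ≤ L then
        doormanAltGo L (M + pvDelta x) (people + 1) none rs
      else
        match rs with
        | [] => people
        | y :: rs' =>
          if |M + pvDelta y| ≤ L then doormanAltGo L (M + pvDelta y) (people + 1) (some x) rs'
          else people
  termination_by held rest => (rest.length, if held.isSome then 1 else 0)

def doorman_alt (string : List String) (L : Int) : Int :=
  doormanAltGo L 0 0 none string

-- ===== PRECONDITION & SPEC =====
def Spec_doorman (string : List String) (L : Int) (out : Int) : Prop := out = doorman_alt string L
instance (string : List String) (L : Int) (out : Int) : Decidable (Spec_doorman string L out) := by unfold Spec_doorman; infer_instance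

-- ===== CLAIM (what is proved, stated in full; the proofs are below) =====
def Claim_equal_doorman : Prop := ∀ (string : List String) (L : Int), Dom_doorman string L → Spec_doorman string L (doorman string L)

-- ===== LEMMAS AND PROOFS =====

-- B's state (held, rest) corresponds to A's list (held.elim rest (· :: rest)).
theorem altGo_eq_go (L : Int) :
    ∀ (held : Option String) (rest : List String) (M people : Int),
      doormanAltGo L M people held rest =
        doormanGo L (match held with | some h => h :: rest | none => rest) M people := by
  intro held rest M people
  fun_induction doormanAltGo L M people held rest <;>
    (try simp_all [doormanGo, check_exceed, pvDelta]) <;>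
    (conv_rhs => rw [doormanGo.eq_def]) <;>
    simp_all [check_exceed]

-- ===== VERDICT (by name: the statement is the Claim_ definition above) =====
theorem doorman_spec : Claim_equal_doorman := by
  intro string L _
  unfold Spec_doorman doorman doorman_alt
  rw [altGo_eq_go]
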